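-- pv_equiv track=rewrite | github.com/bnjlkaNjlowka/cool | python/38.py | check_pan
-- ===== SOURCE A (Python) =====
-- def check_pan(n):
--     str_num=list(str(n))
--     str_num.sort()
--     temp_num=''
--     for i in str_num:
--         if i=='0':
--             return 'Не пан-цифровое число'
--         elif temp_num!=i:
--             temp_num=i
--         elif temp_num==i:
--             return 'Не пан-цифровое число'
--     return 'Пан-цифровое число'
-- ===== SOURCE B (Python) =====
-- def check_pan(n):
--     s = str(n)
--     if '0' in s or len(set(s)) != len(s):
--         return 'Не пан-цифровое число'
--     return 'Пан-цифровое число'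
-- ===== Notes on version B (the rewrite author's own statement) =====
-- stated objective: simpler
-- what changed: Replaces A's sort followed by an adjacent-duplicate scan with a direct membership test for '0' plus a set-based uniqueness check on the unsorted digits.
import Mathlib
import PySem

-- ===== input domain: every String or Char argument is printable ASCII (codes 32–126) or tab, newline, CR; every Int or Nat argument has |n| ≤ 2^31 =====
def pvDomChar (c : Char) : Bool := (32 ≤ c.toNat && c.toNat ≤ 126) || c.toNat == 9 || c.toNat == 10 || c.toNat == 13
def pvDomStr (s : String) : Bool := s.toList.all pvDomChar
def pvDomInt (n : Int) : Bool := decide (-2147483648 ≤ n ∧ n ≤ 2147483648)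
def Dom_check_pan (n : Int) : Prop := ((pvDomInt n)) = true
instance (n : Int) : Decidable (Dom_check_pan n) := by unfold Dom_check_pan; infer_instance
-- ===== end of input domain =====

-- B replaces A's sort + adjacent-duplicate scan with a '0'-membership test and a
-- set-based uniqueness check on the unsorted digits (simpler).

-- ===== PORT A =====
-- the for-loop of A: temp_num starts as '' (a value no 1-char string equals), modelled as none
def checkPanLoop : Option Char → List Char → String
  | _, [] => "Пан-цифровое число"
  | temp, i :: rest =>
    if i = '0' then "Не пан-цифровое число"
    else if temp ≠ some i then checkPanLoop (some i) rest
    else "Не пан-цифровое число"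

def check_pan (n : Int) : String :=
  -- str_num = list(str(n)); str_num.sort()  (sorting 1-char strings = sorting chars by code)
  let str_num := PySem.List.sorted (PySem.Int.toChars n) (fun c => c) false
  checkPanLoop none str_num

-- ===== PORT B =====
def check_pan_alt (n : Int) : String :=
  let s := PySem.Int.toChars n
  -- '0' in s (a 1-char needle: substring search = char membership); len(set(s)) != len(s)
  if '0' ∈ s ∨ (PySem.Set.ofList s).length ≠ s.length then "Не пан-цифровое число"
  else "Пан-цифровое число"

-- ===== PRECONDITION & SPEC =====
def Spec_check_pan (n : Int) (out : String) : Prop := out = check_pan_alt n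
instance (n : Int) (out : String) : Decidable (Spec_check_pan n out) := by unfold Spec_check_pan; infer_instance

-- ===== CLAIM (what is proved, stated in full; the proofs are below) =====
def Claim_equal_check_pan : Prop := ∀ (n : Int), Dom_check_pan n → Spec_check_pan n (check_pan n)

-- ===== LEMMAS AND PROOFS =====

-- A's loop yields one of exactly two strings
theorem checkPanLoop_mem (l : List Char) : ∀ t : Option Char,
    checkPanLoop t l = "Пан-цифровое число" ∨ checkPanLoop t l = "Не пан-цифровое число" := by
  induction l with
  | nil => intro t; exact Or.inl rfl
  | cons c cs ih =>
    intro t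
    rw [checkPanLoop]
    split_ifs with h1 h2
    · exact Or.inr rfl
    · exact ih (some c)
    · exact Or.inr rfl

-- A's loop succeeds iff no '0' occurs and no two consecutive entries
-- (with the incoming temp prepended) are equal.
theorem checkPanLoop_ok (l : List Char) : ∀ t : Option Char,
    (checkPanLoop t l = "Пан-цифровое число" ↔
      ('0' ∉ l ∧ List.IsChain (· ≠ ·) (t.toList ++ l))) := by
  induction l with
  | nil =>
    intro t
    simp only [checkPanLoop, List.not_mem_nil, not_false_iff, true_and, List.append_nil]
    cases t <;> simp
  | cons c cs ih =>
    intro t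
    by_cases hc : c = '0'
    · subst hc
      rw [checkPanLoop, if_pos rfl]
      simp
    · by_cases ht : t = some c
      · subst ht
        rw [checkPanLoop, if_neg hc, if_neg (by simp)]
        constructor
        · intro h; exact absurd h (by decide)
        · rintro ⟨-, hch⟩
          exact absurd rfl ((List.isChain_cons_cons.mp hch).1)
      · rw [checkPanLoop, if_neg hc, if_pos ht, ih (some c)]
        have hm : ('0' ∉ c :: cs) ↔ '0' ∉ cs := by
          simp only [List.mem_cons, not_or]
          constructor
          · exact fun h => h.2
          · exact fun h => ⟨fun he => hc he.symm, h⟩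
        have hchain : List.IsChain (· ≠ ·) (t.toList ++ c :: cs) ↔
            List.IsChain (· ≠ ·) ((Option.some c).toList ++ cs) := by
          cases t with
          | none => simp
          | some a =>
            have ha : a ≠ c := fun h => ht (by rw [h])
            simp [List.isChain_cons_cons, ha]
        rw [hm.symm, hchain.symm]

-- on a weakly increasing list, adjacent-distinct gives strictly increasing
theorem chain_lt_of_le_ne {l : List Char}
    (h1 : List.IsChain (· ≤ ·) l) (h2 : List.IsChain (· ≠ ·) l) : List.IsChain (· < ·) l := by
  induction l with
  | nil => exact List.IsChain.nil
  | cons a tl ih =>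
    cases tl with
    | nil => exact List.IsChain.singleton _
    | cons b tl' =>
      rw [List.isChain_cons_cons] at h1 h2 ⊢
      exact ⟨lt_of_le_of_ne h1.1 h2.1, ih h1.2 h2.2⟩

-- on a weakly increasing list, adjacent-distinct ⟺ no duplicates at all
theorem chain_ne_iff_nodup {l : List Char}
    (hs : l.Pairwise (· ≤ ·)) : List.IsChain (· ≠ ·) l ↔ l.Nodup := by
  constructor
  · intro h
    have hlt : List.IsChain (· < ·) l := chain_lt_of_le_ne hs.isChain h
    exact (List.isChain_iff_pairwise.mp hlt).imp ne_of_lt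
  · intro h
    exact h.isChain

-- |set(xs)| = |xs| ⟺ xs has no duplicates
theorem len_ofList_eq_iff {xs : List Char} :
    (PySem.Set.ofList xs).length = xs.length ↔ xs.Nodup := by
  constructor
  · intro h
    have hnd : (PySem.Set.ofList xs).Nodup := PySem.Set.nodup_ofList xs
    have hsub : PySem.Set.ofList xs ⊆ xs := fun x hx => (PySem.Set.mem_ofList ..).mp hx
    have hperm : (PySem.Set.ofList xs).Perm xs :=
      (hnd.subperm hsub).perm_of_length_le (le_of_eq h.symm)
    exact hperm.nodup_iff.mp hnd
  · intro h
    rw [PySem.Set.ofList_eq_self_of_nodup xs h]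

theorem check_pan_eq_alt (n : Int) : check_pan n = check_pan_alt n := by
  unfold check_pan check_pan_alt
  set s := PySem.Int.toChars n with hs
  set l := PySem.List.sorted s (fun c => c) false with hl
  have hperm : l.Perm s := PySem.List.sorted_perm ..
  have hpw : l.Pairwise (· ≤ ·) := PySem.List.sorted_pairwise ..
  have hok : checkPanLoop none l = "Пан-цифровое число" ↔ ('0' ∉ s ∧ s.Nodup) := by
    rw [checkPanLoop_ok l none]
    simp only [Option.toList_none, List.nil_append]
    rw [chain_ne_iff_nodup hpw, hperm.nodup_iff]
    constructor
    · rintro ⟨h1, h2⟩; exact ⟨fun hm => h1 (hperm.mem_iff.mpr hm), h2⟩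
    · rintro ⟨h1, h2⟩; exact ⟨fun hm => h1 (hperm.mem_iff.mp hm), h2⟩
  by_cases hcond : '0' ∈ s ∨ (PySem.Set.ofList s).length ≠ s.length
  · rw [if_pos hcond]
    rcases checkPanLoop_mem l none with h | h
    · exfalso
      rcases hok.mp h with ⟨h1, h2⟩
      rcases hcond with hc | hc
      · exact h1 hc
      · exact hc (len_ofList_eq_iff.mpr h2)
    · exact h
  · rw [if_neg hcond]
    push Not at hcond
    exact hok.mpr ⟨hcond.1, len_ofList_eq_iff.mp hcond.2⟩

-- ===== VERDICT (by name: the statement is the Claim_ definition above) =====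
theorem check_pan_spec : Claim_equal_check_pan := by
  intro n _
  exact check_pan_eq_alt n
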